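-- pv_equiv track=rewrite | github.com/s-victor/TinyPedal | tinypedal/readapi.py | calc_veh_class_list
-- ===== SOURCE A (Python) =====
-- def calc_veh_class_list(unsorted_veh_class, unique_veh_class):
--     """Calculate vehicle class info list"""
--     sorted_veh_class = sorted(unsorted_veh_class)  # sort & group different vehicle class list
--     unique_veh_class = list(set(unique_veh_class))  # create unique vehicle class list
--     unique_initial_class = unique_veh_class[0]  # set initial unique class name for comparison
--
--     # Create vehicle class reference list (vehicle index, position in class, class name, place)
--     veh_class_info = []
--     pos_counter = 0  # position in class
--     for index in range(len(sorted_veh_class)):  # loop through sorted vehicle class list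
--         for unique_idx in range(len(unique_veh_class)):  # unique vehicle class range
--             if sorted_veh_class[index][0] == unique_veh_class[unique_idx]:
--                 if unique_initial_class == unique_veh_class[unique_idx]:
--                     pos_counter += 1
--                 else:
--                     pos_counter = 1  # reset position counter
--                     unique_initial_class = unique_veh_class[unique_idx]  # reset init name
--                 veh_class_info.append((sorted_veh_class[index][2],
--                                        pos_counter,
--                                        unique_veh_class[unique_idx],
--                                        sorted_veh_class[index][1]
--                                        ))
--     return sorted(veh_class_info)
-- ===== SOURCE B (Python) =====
-- def _split_class_block(entries):
--     """Split off the leading run of entries sharing the first entry's class."""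
--     cls = entries[0][0]
--     k = 1
--     while k < len(entries) and entries[k][0] == cls:
--         k += 1
--     return entries[:k], entries[k:]
--
--
-- def calc_veh_class_list(unsorted_veh_class, unique_veh_class):
--     """Calculate vehicle class info list (split the sorted list into class
--     blocks, then number each kept block 1..k with enumerate)."""
--     rest = sorted(unsorted_veh_class)
--     unique_set = set(unique_veh_class)
--     veh_class_info = []
--     while rest:
--         block, rest = _split_class_block(rest)
--         cls = block[0][0]
--         if cls in unique_set:
--             for pos, entry in enumerate(block, 1):
--                 veh_class_info.append((entry[2], pos, cls, entry[1]))
--     return sorted(veh_class_info)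
-- ===== Notes on version B (the rewrite author's own statement) =====
-- stated objective: faster
-- what changed: Replaces A's flat scan with an inner loop over the unique-class list and a running counter/sentinel by splitting the sorted list into contiguous class blocks (two-pointer span) and numbering each kept block 1..k with enumerate.
import Mathlib
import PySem

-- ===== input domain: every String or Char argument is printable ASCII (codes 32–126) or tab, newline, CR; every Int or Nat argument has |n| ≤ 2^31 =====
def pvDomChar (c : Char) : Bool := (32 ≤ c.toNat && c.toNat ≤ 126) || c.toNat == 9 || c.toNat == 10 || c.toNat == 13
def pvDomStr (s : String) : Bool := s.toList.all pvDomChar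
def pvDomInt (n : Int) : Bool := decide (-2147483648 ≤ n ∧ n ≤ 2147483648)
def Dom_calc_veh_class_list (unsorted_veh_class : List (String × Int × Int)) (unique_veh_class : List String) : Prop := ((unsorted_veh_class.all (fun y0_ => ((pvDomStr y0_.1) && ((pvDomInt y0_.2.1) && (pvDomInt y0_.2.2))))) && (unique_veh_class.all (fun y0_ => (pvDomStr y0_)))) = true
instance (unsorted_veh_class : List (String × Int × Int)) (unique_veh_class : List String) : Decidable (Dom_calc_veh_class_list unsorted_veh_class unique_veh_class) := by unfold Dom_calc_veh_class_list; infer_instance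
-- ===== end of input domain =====

-- B replaces A's flat scan (inner loop over the unique-class list plus a running
-- counter/sentinel) by splitting the sorted list into contiguous class blocks and
-- numbering each kept block 1..k; objective: faster (no inner scan per element).


-- Python's tuple comparison is lexicographic: sort keys mapping into Prod.Lex orders.
def pvKey3 (e : String × Int × Int) : Lex (String × Lex (Int × Int)) :=
  toLex (e.1, toLex (e.2.1, e.2.2))
def pvKey4 (e : Int × Int × String × Int) : Lex (Int × Lex (Int × Lex (String × Int))) :=
  toLex (e.1, toLex (e.2.1, toLex (e.2.2.1, e.2.2.2)))

-- ===== PORT A =====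
-- state: (veh_class_info, pos_counter, unique_initial_class)
def aState : Type := List (Int × Int × String × Int) × Int × String

-- one iteration of A's inner loop body (for a fixed sorted element sv and unique class uc)
def aStep (sv : String × Int × Int) (st : aState) (uc : String) : aState :=
  if sv.1 = uc then
    if st.2.2 = uc then
      (st.1 ++ [(sv.2.2, st.2.1 + 1, uc, sv.2.1)], st.2.1 + 1, st.2.2)
    else
      (st.1 ++ [(sv.2.2, (1 : Int), uc, sv.2.1)], 1, uc)
  else st

def calc_veh_class_list (unsorted_veh_class : List (String × Int × Int)) (unique_veh_class : List String) : List (Int × Int × String × Int) :=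
  let sorted_veh_class := PySem.List.sorted unsorted_veh_class pvKey3
  let unique := PySem.Set.ofList unique_veh_class   -- list(set(unique_veh_class))
  match unique with
  | [] => []  -- Python: `unique_veh_class[0]` raises IndexError here; excluded by Pre_
  | unique_initial_class :: _ =>
    let st := sorted_veh_class.foldl
      (fun st sv => unique.foldl (fun st uc => aStep sv st uc) st)
      (([] : List (Int × Int × String × Int)), (0 : Int), unique_initial_class)
    PySem.List.sorted st.1 pvKey4

-- ===== PORT B =====
-- Source B's while loop: split off the leading class block, number it 1..k if kept, recurse on the rest.
def bNumber (cls : String) (block : List (String × Int × Int)) : List (Int × Int × String × Int) :=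
  (block.zipIdx 1).map (fun p => (p.1.2.2, (p.2 : Int), cls, p.1.2.1))

-- the while loop, structurally recursive on a fuel bounding the list length
def bGoF (uset : PySem.Set String) : Nat → List (String × Int × Int) → List (Int × Int × String × Int)
  | _, [] => []
  | 0, _ :: _ => []   -- unreachable: fuel ≥ length
  | fuel + 1, e :: rest =>
    -- _split_class_block: the leading run sharing e's class, and the remainder
    let block := e :: rest.takeWhile (fun x => x.1 == e.1)
    let rest' := rest.dropWhile (fun x => x.1 == e.1)
    (if PySem.Set.contains uset e.1 then bNumber e.1 block else []) ++ bGoF uset fuel rest'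

def bGo (uset : PySem.Set String) (l : List (String × Int × Int)) : List (Int × Int × String × Int) :=
  bGoF uset l.length l

def calc_veh_class_list_alt (unsorted_veh_class : List (String × Int × Int)) (unique_veh_class : List String) : List (Int × Int × String × Int) :=
  let rest := PySem.List.sorted unsorted_veh_class pvKey3
  let unique_set := PySem.Set.ofList unique_veh_class
  PySem.List.sorted (bGo unique_set rest) pvKey4

-- ===== PRECONDITION & SPEC =====
-- Pre_ excludes only the inputs on which A raises IndexError (empty unique_veh_class).
def Pre_calc_veh_class_list (unsorted_veh_class : List (String × Int × Int)) (unique_veh_class : List String) : Prop := unique_veh_class ≠ []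
instance (unsorted_veh_class : List (String × Int × Int)) (unique_veh_class : List String) : Decidable (Pre_calc_veh_class_list unsorted_veh_class unique_veh_class) := by unfold Pre_calc_veh_class_list; infer_instance
def pvWitness_calc_veh_class_list : (List (String × Int × Int)) × List String :=
  ([("GT", 3, 0), ("P1", 1, 1), ("GT", 2, 2)], ["GT", "P1"])

def Spec_calc_veh_class_list (unsorted_veh_class : List (String × Int × Int)) (unique_veh_class : List String) (out : List (Int × Int × String × Int)) : Prop := out = calc_veh_class_list_alt unsorted_veh_class unique_veh_class
instance (unsorted_veh_class : List (String × Int × Int)) (unique_veh_class : List String) (out : List (Int × Int × String × Int)) : Decidable (Spec_calc_veh_class_list unsorted_veh_class unique_veh_class out) := by unfold Spec_calc_veh_class_list; infer_instance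

-- ===== CLAIM (what is proved, stated in full; the proofs are below) =====
def Claim_equal_calc_veh_class_list : Prop := ∀ (unsorted_veh_class : List (String × Int × Int)) (unique_veh_class : List String), Dom_calc_veh_class_list unsorted_veh_class unique_veh_class → Pre_calc_veh_class_list unsorted_veh_class unique_veh_class → Spec_calc_veh_class_list unsorted_veh_class unique_veh_class (calc_veh_class_list unsorted_veh_class unique_veh_class)

-- ===== LEMMAS AND PROOFS =====

-- A's match step (the inner-loop body at the unique class equal to sv's class)
def aMatch (sv : String × Int × Int) (st : aState) : aState :=
  if st.2.2 = sv.1 then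
    (st.1 ++ [(sv.2.2, st.2.1 + 1, sv.1, sv.2.1)], st.2.1 + 1, st.2.2)
  else
    (st.1 ++ [(sv.2.2, (1 : Int), sv.1, sv.2.1)], 1, sv.1)

theorem aStep_of_ne (sv : String × Int × Int) (st : aState) (uc : String)
    (h : sv.1 ≠ uc) : aStep sv st uc = st := by
  simp [aStep, h]

theorem aInner_of_not_mem (sv : String × Int × Int) (u : List String) (st : aState)
    (h : sv.1 ∉ u) : u.foldl (fun st uc => aStep sv st uc) st = st := by
  induction u generalizing st with
  | nil => rfl
  | cons x xs ih =>
    have hx : sv.1 ≠ x := fun he => h (he ▸ List.mem_cons_self)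
    simp only [List.foldl_cons, aStep_of_ne sv st x hx]
    exact ih st (fun hm => h (List.mem_cons_of_mem _ hm))

theorem aInner_eq (sv : String × Int × Int) (u : List String) (st : aState)
    (hu : u.Nodup) :
    u.foldl (fun st uc => aStep sv st uc) st
      = if sv.1 ∈ u then aMatch sv st else st := by
  induction u generalizing st with
  | nil => simp
  | cons x xs ih =>
    rcases List.nodup_cons.mp hu with ⟨hx, hxs⟩
    by_cases hm : sv.1 = x
    · have hstep : aStep sv st x = aMatch sv st := by
        subst hm; simp [aStep, aMatch]
      simp only [List.foldl_cons, hstep]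
      rw [aInner_of_not_mem sv xs (aMatch sv st) (hm ▸ hx)]
      simp [hm]
    · simp only [List.foldl_cons, aStep_of_ne sv st x hm, ih st hxs]
      simp [List.mem_cons, hm]

-- the numbering of a class block, counting on from k (proof-side view of bNumber)
def numFrom (c : String) (k : Int) : List (String × Int × Int) → List (Int × Int × String × Int)
  | [] => []
  | e :: t => (e.2.2, k + 1, c, e.2.1) :: numFrom c (k + 1) t

theorem bNumber_eq_numFrom (c : String) (block : List (String × Int × Int)) (n : Nat) :
    (block.zipIdx (n + 1)).map (fun p => (p.1.2.2, (p.2 : Int), c, p.1.2.1))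
      = numFrom c (n : Int) block := by
  induction block generalizing n with
  | nil => rfl
  | cons x xs ih =>
    simp only [List.zipIdx_cons, List.map_cons, numFrom]
    refine congrArg₂ _ (by push_cast; rfl) ?_
    simpa using ih (n + 1)

-- A's fold over a block of matched entries, all of class c, with cur already c
theorem contA (u : List String) (hu : u.Nodup) (c : String) (hc : c ∈ u) :
    ∀ (block : List (String × Int × Int)), (∀ x ∈ block, x.1 = c) →
    ∀ (out : List (Int × Int × String × Int)) (k : Int),
    block.foldl (fun st sv => u.foldl (fun st uc => aStep sv st uc) st) (out, k, c)
      = (out ++ numFrom c k block, k + block.length, c) := by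
  intro block
  induction block generalizing c with
  | nil => intro _ out k; simp [numFrom]
  | cons x bs ih =>
    intro hall out k
    have hx : x.1 = c := hall x List.mem_cons_self
    have hmem : x.1 ∈ u := hx ▸ hc
    simp only [List.foldl_cons]
    rw [aInner_eq x u _ hu, if_pos hmem]
    have hm : aMatch x (out, k, c) = (out ++ [(x.2.2, k + 1, c, x.2.1)], k + 1, c) := by
      simp [aMatch, hx]
    rw [hm, ih c hc (fun y hy => hall y (List.mem_cons_of_mem _ hy))]
    simp only [numFrom, List.length_cons]
    push_cast
    rw [show k + 1 + (bs.length : Int) = k + ((bs.length : Int) + 1) by ring]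
    simp

-- A's fold over a block of unmatched entries (class c not in the unique set)
theorem skipA (u : List String) (c : String) (hc : c ∉ u) :
    ∀ (block : List (String × Int × Int)), (∀ x ∈ block, x.1 = c) →
    ∀ (st : aState),
    block.foldl (fun st sv => u.foldl (fun st uc => aStep sv st uc) st) st = st := by
  intro block
  induction block with
  | nil => intro _ st; rfl
  | cons x bs ih =>
    intro hall st
    have hx : x.1 = c := hall x List.mem_cons_self
    simp only [List.foldl_cons]
    rw [aInner_of_not_mem x u st (hx ▸ hc)]
    exact ih (fun y hy => hall y (List.mem_cons_of_mem _ hy)) st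

-- the sorted-order facts: everything after the leading class block has a new class
theorem fst_le_of_key3_le {a b : String × Int × Int} (h : pvKey3 a ≤ pvKey3 b) :
    a.1 ≤ b.1 := by
  have h' := Prod.Lex.le_iff.mp h
  simp only [pvKey3, ofLex_toLex] at h'
  rcases h' with hlt | ⟨heq, _⟩
  · exact le_of_lt hlt
  · exact le_of_eq heq

theorem dropWhile_fst_ne (e : String × Int × Int) :
    ∀ (t : List (String × Int × Int)),
    ((e :: t).Pairwise (fun a b => pvKey3 a ≤ pvKey3 b)) →
    ∀ x ∈ t.dropWhile (fun y => y.1 == e.1), x.1 ≠ e.1 := by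
  intro t
  induction t with
  | nil => intro _ x hx; simp at hx
  | cons y t' ih =>
    intro hpw x hx
    rcases List.pairwise_cons.mp hpw with ⟨he, hyt⟩
    rcases List.pairwise_cons.mp hyt with ⟨hy, ht'⟩
    by_cases hcls : (y.1 == e.1) = true
    · simp only [List.dropWhile_cons, hcls, if_true] at hx
      have hpw' : (e :: t').Pairwise (fun a b => pvKey3 a ≤ pvKey3 b) :=
        List.pairwise_cons.mpr ⟨fun z hz => he z (List.mem_cons_of_mem _ hz), ht'⟩
      exact ih hpw' x hx
    · simp only [List.dropWhile_cons, hcls, if_false, Bool.false_eq_true] at hx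
      have hyne : y.1 ≠ e.1 := by simpa using hcls
      have hey : e.1 < y.1 :=
        lt_of_le_of_ne (fst_le_of_key3_le (he y List.mem_cons_self)) (Ne.symm hyne)
      rcases List.mem_cons.mp hx with rfl | hx'
      · exact hyne
      · have hlt : e.1 < x.1 := lt_of_lt_of_le hey (fst_le_of_key3_le (hy x hx'))
        intro hxe
        rw [hxe] at hlt
        exact lt_irrefl _ hlt

-- main loop correspondence: A's fold over a sorted list produces exactly B's blocks
theorem mainEq (u : List String) (hu : u.Nodup) :
    ∀ (fuel : Nat) (s : List (String × Int × Int)), s.length ≤ fuel →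
    s.Pairwise (fun a b => pvKey3 a ≤ pvKey3 b) →
    ∀ (out : List (Int × Int × String × Int)) (k : Int) (cur : String),
    (k = 0 ∨ ∀ x ∈ s, x.1 ≠ cur) →
    (s.foldl (fun st sv => u.foldl (fun st uc => aStep sv st uc) st)
        ((out, k, cur) : aState)).1
      = out ++ bGoF u fuel s := by
  intro fuel
  induction fuel with
  | zero =>
    intro s hlen _ out k cur _
    have : s = [] := List.eq_nil_of_length_eq_zero (Nat.le_zero.mp hlen)
    subst this; simp [bGoF]
  | succ fuel ih =>
    intro s hlen hpw out k cur hk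
    match s with
    | [] => simp [bGoF]
    | e :: rest =>
      have hsplit : e :: rest
          = (e :: rest.takeWhile (fun x => x.1 == e.1))
            ++ rest.dropWhile (fun x => x.1 == e.1) := by
        simp [List.takeWhile_append_dropWhile]
      have htw : ∀ x ∈ e :: rest.takeWhile (fun x => x.1 == e.1), x.1 = e.1 := by
        intro x hx
        rcases List.mem_cons.mp hx with rfl | hx'
        · rfl
        · simpa using List.mem_takeWhile_imp hx'
      have hdw_ne : ∀ x ∈ rest.dropWhile (fun x => x.1 == e.1), x.1 ≠ e.1 :=
        dropWhile_fst_ne e rest hpw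
      have hdw_pw : (rest.dropWhile (fun x => x.1 == e.1)).Pairwise
          (fun a b => pvKey3 a ≤ pvKey3 b) :=
        (List.pairwise_cons.mp hpw).2.sublist (List.dropWhile_sublist _)
      have hdw_len : (rest.dropWhile (fun x => x.1 == e.1)).length ≤ fuel :=
        le_trans (List.length_dropWhile_le _ _) (Nat.lt_succ_iff.mp (by simpa using hlen))
      rw [hsplit, List.foldl_append]
      by_cases hc : e.1 ∈ u
      · -- unify the two aMatch outcomes at the first block element
        simp only [List.foldl_cons]
        rw [aInner_eq e u _ hu, if_pos hc]
        have hfirst : aMatch e ((out, k, cur) : aState)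
            = ((out ++ [(e.2.2, 1, e.1, e.2.1)], 1, e.1) : aState) := by
          by_cases hcur : cur = e.1
          · have hk0 : k = 0 := by
              rcases hk with hk0 | hne
              · exact hk0
              · exact absurd hcur.symm (hne e List.mem_cons_self)
            simp [aMatch, hcur, hk0]
          · simp [aMatch, hcur]
        rw [hfirst,
          contA u hu e.1 hc _ (fun y hy => htw y (List.mem_cons_of_mem _ hy)) _ 1]
        rw [ih _ hdw_len hdw_pw _ _ _ (Or.inr hdw_ne)]
        have hcontains : PySem.Set.contains u e.1 = true := by
          simpa [PySem.Set.contains] using hc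
        rw [← hsplit]
        rw [show bGoF u (fuel + 1) (e :: rest)
            = bNumber e.1 (e :: rest.takeWhile (fun x => x.1 == e.1))
              ++ bGoF u fuel (rest.dropWhile (fun x => x.1 == e.1)) by
          simp only [bGoF]; rw [hcontains]; simp]
        have hbn : bNumber e.1 (e :: rest.takeWhile (fun x => x.1 == e.1))
            = (e.2.2, 1, e.1, e.2.1) :: numFrom e.1 1 (rest.takeWhile (fun x => x.1 == e.1)) := by
          show ((e :: _).zipIdx 1).map _ = _
          rw [show (1 : Nat) = 0 + 1 from rfl, bNumber_eq_numFrom]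
          simp [numFrom]
        rw [hbn]
        simp
      · rw [skipA u e.1 hc _ htw]
        rw [ih _ hdw_len hdw_pw out k cur ?_]
        · have hcontains : PySem.Set.contains u e.1 = false := by
            simpa [PySem.Set.contains] using hc
          rw [← hsplit]
          rw [show bGoF u (fuel + 1) (e :: rest)
              = [] ++ bGoF u fuel (rest.dropWhile (fun x => x.1 == e.1)) by
            simp only [bGoF]; rw [hcontains]; simp]
          simp
        · rcases hk with hk0 | hne
          · exact Or.inl hk0
          · exact Or.inr fun x hx =>
              hne x (hsplit ▸ List.mem_append_right _ hx)

-- ===== VERDICT (by name: the statement is the Claim_ definition above) =====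
theorem calc_veh_class_list_spec : Claim_equal_calc_veh_class_list := by
  intro usc uvc _ hpre
  unfold Spec_calc_veh_class_list calc_veh_class_list calc_veh_class_list_alt bGo
  have hnodup : (PySem.Set.ofList uvc).Nodup := PySem.Set.nodup_ofList uvc
  cases hu : PySem.Set.ofList uvc with
  | nil =>
    cases huvc : uvc with
    | nil => exact absurd huvc hpre
    | cons y ys =>
      have hy : y ∈ PySem.Set.ofList uvc := by
        rw [PySem.Set.mem_ofList, huvc]; exact List.mem_cons_self
      rw [hu] at hy
      exact absurd hy (List.not_mem_nil)
  | cons init rest =>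
    rw [hu] at hnodup
    have := mainEq (init :: rest) hnodup (PySem.List.sorted usc pvKey3).length
      (PySem.List.sorted usc pvKey3) le_rfl
      (PySem.List.sorted_pairwise usc pvKey3) [] 0 init (Or.inl rfl)
    simp only [this, List.nil_append]
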